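-- pv_equiv track=rewrite | github.com/mintropy/PS | BAEKJOON/Python/2000/2600/2661.py | search
-- ===== SOURCE A (Python) =====
-- def search(N: int, seq: str) -> str:
--     if not N:
--         return seq
--     for s in ("1", "2", "3"):
--         next_seq = seq + s
--         if not is_good_seq(next_seq):
--             continue
--         if ans := search(N - 1, next_seq):
--             return ans
--     return ""
--
-- def is_good_seq(seq: str) -> bool:
--     for l in range(1, len(seq) // 2 + 1):
--         left, right = seq[len(seq) - (l * 2) : len(seq) - l], seq[len(seq) - l :]
--         if left == right:
--             return False
--     return True
-- ===== SOURCE B (Python) =====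
-- def search(N: int, seq: str) -> str:
--     # Iterative backtracking with an explicit stack instead of recursion.
--     # (For N < 0 the recursive original raises RecursionError; here we just return seq.)
--     target = len(seq) + N
--     cur = seq
--     if len(cur) >= target:
--         return cur
--     stack = [1]  # per depth: the next digit to try there
--     while stack:
--         d = stack[-1]
--         if d > 3:
--             stack.pop()
--             if stack:
--                 cur = cur[:-1]
--                 stack[-1] += 1
--             continue
--         cand = cur + str(d)
--         if ok_suffix(cand):
--             if len(cand) == target:
--                 return cand
--             cur = cand
--             stack.append(1)
--         else:
--             stack[-1] += 1
--     return ""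
--
--
-- def ok_suffix(s: str) -> bool:
--     n = len(s)
--     return all(s[n - l * 2 : n - l] != s[n - l :] for l in range(1, n // 2 + 1))
-- ===== Notes on version B (the rewrite author's own statement) =====
-- stated objective: alternative
-- what changed: The recursive DFS is replaced by iterative backtracking over an explicit stack of next-digit-to-try entries, and the suffix check becomes an all() over the candidate repeat lengths instead of an early-return loop.
import Mathlib
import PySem

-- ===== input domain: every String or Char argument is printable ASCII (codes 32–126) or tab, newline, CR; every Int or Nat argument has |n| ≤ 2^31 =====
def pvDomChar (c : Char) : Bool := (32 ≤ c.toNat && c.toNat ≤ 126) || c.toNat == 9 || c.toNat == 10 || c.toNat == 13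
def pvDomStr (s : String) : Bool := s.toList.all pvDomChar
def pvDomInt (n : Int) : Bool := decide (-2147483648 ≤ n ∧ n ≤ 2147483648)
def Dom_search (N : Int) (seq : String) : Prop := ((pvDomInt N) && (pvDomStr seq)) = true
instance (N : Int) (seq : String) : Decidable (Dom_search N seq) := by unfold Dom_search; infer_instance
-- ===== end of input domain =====

-- B rewrites A's recursive DFS as iterative backtracking with an explicit stack (objective: alternative).

-- ===== PORT A =====
-- is_good_seq's for-loop with early return, as recursion over the range list
def goodLoop (s : List Char) : List Int → Bool
  | [] => true
  | l :: ls =>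
    if PySem.List.slice s (some ((s.length : Int) - l * 2)) (some ((s.length : Int) - l))
        = PySem.List.slice s (some ((s.length : Int) - l)) none
    then false
    else goodLoop s ls

def isGoodSeq (s : List Char) : Bool :=
  goodLoop s (PySem.List.pyRange 1 (PySem.Int.floordiv (s.length : Int) 2 + 1) 1)

-- A recurses with N-1 down to 0; Python raises RecursionError for N < 0 (excluded by
-- Pre_search), so the port recurses on N.toNat.  The for-loop over ("1","2","3") with
-- early return becomes recursion over that digit list (tryDigits).
mutual
def searchGo (k : Nat) (cur : List Char) : List Char :=
  match k with
  | 0 => cur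
  | k' + 1 => tryDigits k' cur ['1', '2', '3']
termination_by (k, 0)

def tryDigits (k : Nat) (cur : List Char) (ds : List Char) : List Char :=
  match ds with
  | [] => []
  | s :: rest =>
    let nextSeq := cur ++ [s]
    if ¬ (isGoodSeq nextSeq = true) then tryDigits k cur rest
    else
      let ans := searchGo k nextSeq
      if ans ≠ [] then ans else tryDigits k cur rest
termination_by (k, ds.length + 1)
end

def search (N : Int) (seq : String) : String :=
  String.ofList (searchGo N.toNat seq.toList)

-- ===== PORT B =====
def okSuffix (s : List Char) : Bool :=
  (PySem.List.pyRange 1 (PySem.Int.floordiv (s.length : Int) 2 + 1) 1).all fun l =>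
    !(decide (PySem.List.slice s (some ((s.length : Int) - l * 2)) (some ((s.length : Int) - l))
        = PySem.List.slice s (some ((s.length : Int) - l)) none))

-- the while-loop: stack head = top of Source B's stack (the next digit to try at this depth)
def loopB (target : Int) : Nat → List Char → List Int → List Char
  | 0, _, _ => []
  | _ + 1, _, [] => []
  | fuel + 1, cur, d :: rest =>
    if 3 < d then
      match rest with
      | [] => []
      | d' :: rest' => loopB target fuel cur.dropLast ((d' + 1) :: rest')
    else
      let cand := cur ++ (PySem.Int.toStr d).toList
      if okSuffix cand then
        if (cand.length : Int) = target then cand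
        else loopB target fuel cand (1 :: d :: rest)
      else loopB target fuel cur ((d + 1) :: rest)

def search_alt (N : Int) (seq : String) : String :=
  let cur := seq.toList
  let target : Int := (cur.length : Int) + N
  if target ≤ (cur.length : Int) then seq
  else String.ofList (loopB target (2 * 3 ^ N.toNat) cur [1])

-- ===== PRECONDITION & SPEC =====
-- Pre_ excludes only N < 0, where Python A recurses without a base case and raises RecursionError.
def Pre_search (N : Int) (seq : String) : Prop := 0 ≤ N
instance (N : Int) (seq : String) : Decidable (Pre_search N seq) := by unfold Pre_search; infer_instance
def pvWitness_search : Int × String := (2, "1")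

def Spec_search (N : Int) (seq : String) (out : String) : Prop := out = search_alt N seq
instance (N : Int) (seq : String) (out : String) : Decidable (Spec_search N seq out) := by unfold Spec_search; infer_instance

-- ===== CLAIM (what is proved, stated in full; the proofs are below) =====
def Claim_equal_search : Prop := ∀ (N : Int) (seq : String), Dom_search N seq → Pre_search N seq → Spec_search N seq (search N seq)

-- ===== LEMMAS AND PROOFS =====

-- exact fuel a depth needs (proof bookkeeping; the port's fuel 2*3^N is shown to dominate it)
def digitsAfuel : Nat → Nat → Nat
  | _, 0 => 1
  | 0, _ + 1 => 1
  | 1, nd + 1 => 1 + digitsAfuel 1 nd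
  | k + 2, nd + 1 => 1 + digitsAfuel (k + 1) 3 + digitsAfuel (k + 2) nd

-- the digits Source B still has to try at a depth whose next-digit entry is d, in A's vocabulary
def digitsFrom (d : Int) : List Char :=
  if d ≤ 1 then ['1', '2', '3'] else if d = 2 then ['2', '3'] else if d = 3 then ['3'] else []

-- what Source B's backtracking does after the current depth is exhausted, in A's vocabulary
def unwindSpec : Nat → List Int → List Char → List Char
  | _, [], _ => []
  | k, d :: rest, cur =>
    let cur' := cur.dropLast
    let r := tryDigits (k + 1) cur' (digitsFrom (d + 1))
    if r = [] then unwindSpec (k + 1) rest cur' else r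

-- fuel still needed by the suspended ancestor depths
def restSum : Nat → List Int → Nat
  | _, [] => 0
  | k, d :: rest => digitsAfuel (k + 2) (digitsFrom (d + 1)).length + restSum (k + 1) rest

-- fuel needed from a loop state
def needed (k : Nat) (d : Int) (rest : List Int) : Nat :=
  digitsAfuel (k + 1) (digitsFrom d).length + restSum k rest

lemma one_le_digitsAfuel (k nd : Nat) : 1 ≤ digitsAfuel k nd := by
  match k, nd with
  | _, 0 => simp [digitsAfuel]
  | 0, _ + 1 => simp [digitsAfuel]
  | 1, _ + 1 => simp [digitsAfuel]
  | _ + 2, _ + 1 => simp only [digitsAfuel]; omega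

lemma succ_le_digitsAfuel (k m : Nat) (hk : 1 ≤ k) :
    digitsAfuel k m + 1 ≤ digitsAfuel k (m + 1) := by
  match k, hk with
  | 1, _ => simp [digitsAfuel]
  | k + 2, _ => simp only [digitsAfuel]; omega

lemma digitsAfuel_three (k : Nat) : digitsAfuel (k + 1) 3 = 2 * 3 ^ (k + 1) - 2 := by
  induction k with
  | zero =>
    show digitsAfuel 1 3 = 2 * 3 ^ 1 - 2
    simp [digitsAfuel]
  | succ k ih =>
    have h3 : (3 : Nat) ^ (k + 2) = 3 * 3 ^ (k + 1) := by ring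
    have h1 : 1 ≤ (3 : Nat) ^ (k + 1) := Nat.one_le_pow _ _ (by omega)
    simp only [digitsAfuel, ih]
    omega

lemma goodLoop_eq_all (s : List Char) (ls : List Int) :
    goodLoop s ls = ls.all fun l =>
      !(decide (PySem.List.slice s (some ((s.length : Int) - l * 2)) (some ((s.length : Int) - l))
          = PySem.List.slice s (some ((s.length : Int) - l)) none)) := by
  induction ls with
  | nil => rfl
  | cons l ls ih =>
    simp only [goodLoop, List.all_cons]
    split_ifs with h <;> simp [h, ih]

lemma isGoodSeq_eq_okSuffix (s : List Char) : isGoodSeq s = okSuffix s := by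
  simp [isGoodSeq, okSuffix, goodLoop_eq_all]

lemma loopB_eq (target : Int) :
    ∀ (fuel k : Nat) (cur : List Char) (d : Int) (rest : List Int),
    1 ≤ d → (∀ x ∈ rest, 1 ≤ x) → rest.length ≤ cur.length →
    (cur.length : Int) + ((k : Int) + 1) = target →
    needed k d rest ≤ fuel →
    loopB target fuel cur (d :: rest) =
      (if tryDigits k cur (digitsFrom d) = [] then unwindSpec k rest cur
       else tryDigits k cur (digitsFrom d)) := by
  intro fuel
  induction fuel with
  | zero =>
    intro k cur d rest _ _ _ _ hfuel
    exfalso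
    have h1 := one_le_digitsAfuel (k + 1) (digitsFrom d).length
    unfold needed at hfuel
    omega
  | succ fuel ih =>
    intro k cur d rest hd hrest hlen harith hfuel
    by_cases hd3 : 3 < d
    · -- exhausted depth: pop
      have hdf : digitsFrom d = [] := by
        unfold digitsFrom; split_ifs <;> first | rfl | omega
      rw [hdf]
      match rest, hrest, hlen with
      | [], _, _ => simp [loopB, hd3, tryDigits, unwindSpec]
      | d' :: rest', hrest, hlen =>
        have hcur : cur ≠ [] := by
          intro h; subst h; simp at hlen
        have hstep : loopB target (fuel + 1) cur (d :: d' :: rest') =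
            loopB target fuel cur.dropLast ((d' + 1) :: rest') := by
          simp [loopB, hd3]
        rw [hstep, ih (k + 1) cur.dropLast (d' + 1) rest'
              (by have := hrest d' (by simp); omega)
              (fun x hx => hrest x (by simp [hx]))
              (by simp [List.length_dropLast]; simp at hlen; omega)
              (by
                have h1 : (cur.dropLast.length : Int) = (cur.length : Int) - 1 := by
                  have : cur.length ≠ 0 := by simpa using hcur
                  simp [List.length_dropLast]; omega
                omega)
              (by
                simp only [needed, restSum, hdf, List.length_nil, digitsAfuel,
                  show k + 1 + 1 = k + 2 from rfl] at hfuel ⊢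
                omega)]
        simp [tryDigits, unwindSpec]
    · -- d ∈ {1,2,3}: try digit d
      have hd3' : d ≤ 3 := by omega
      have key : ∀ (s : Char) (restd : List Char),
          digitsFrom d = s :: restd →
          (PySem.Int.toStr d).toList = [s] →
          digitsFrom (d + 1) = restd →
          (digitsFrom d).length = restd.length + 1 →
          loopB target (fuel + 1) cur (d :: rest) =
            (if tryDigits k cur (digitsFrom d) = [] then unwindSpec k rest cur
             else tryDigits k cur (digitsFrom d)) := by
        intro s restd hdf htos hdf1 hlendf
        have hcand_ne : cur ++ [s] ≠ [] := by simp
        rw [hdf]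
        by_cases hgood : okSuffix (cur ++ [s]) = true
        · -- candidate passes the suffix check
          by_cases hfull : ((cur ++ [s]).length : Int) = target
          · -- reached the target length: k = 0
            have hk0 : k = 0 := by simp at hfull; omega
            subst hk0
            have hlhs : loopB target (fuel + 1) cur (d :: rest) = cur ++ [s] := by
              simp only [loopB]
              rw [if_neg (by omega), htos, if_pos hgood, if_pos hfull]
            rw [hlhs]
            simp only [tryDigits, searchGo, isGoodSeq_eq_okSuffix, hgood]
            simp [hcand_ne]
          · -- descend
            have hk : ∃ k', k = k' + 1 := by
              rcases Nat.exists_eq_add_of_lt (show 0 < k by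
                simp at hfull; omega) with ⟨k', hk'⟩
              exact ⟨k', by omega⟩
            rcases hk with ⟨k', rfl⟩
            have hstep : loopB target (fuel + 1) cur (d :: rest) =
                loopB target fuel (cur ++ [s]) (1 :: d :: rest) := by
              simp only [loopB]
              rw [if_neg (by omega), htos, if_pos hgood, if_neg hfull]
            rw [hstep, ih k' (cur ++ [s]) 1 (d :: rest)
                  le_rfl
                  (by intro x hx; simp at hx; rcases hx with h | h; omega; exact hrest x h)
                  (by simp; omega)
                  (by simp at harith ⊢; omega)
                  (by
                    simp only [needed, restSum, hdf1, hlendf,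
                      show ((digitsFrom 1).length = 3) from rfl,
                      show k' + 1 + 1 = k' + 2 from rfl] at hfuel ⊢
                    have hrec : digitsAfuel (k' + 2) (restd.length + 1) =
                        1 + digitsAfuel (k' + 1) 3 + digitsAfuel (k' + 2) restd.length := by
                      simp [digitsAfuel]
                    rw [hrec] at hfuel
                    omega)]
            have hdrop : (cur ++ [s]).dropLast = cur := by
              simp
            have hT : tryDigits (k' + 1) cur (s :: restd) =
                (if searchGo (k' + 1) (cur ++ [s]) = [] then tryDigits (k' + 1) cur restd
                 else searchGo (k' + 1) (cur ++ [s])) := by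
              simp only [tryDigits, isGoodSeq_eq_okSuffix, hgood]
              by_cases hRe : searchGo (k' + 1) (cur ++ [s]) = [] <;> simp [hRe]
            have hG : searchGo (k' + 1) (cur ++ [s]) =
                tryDigits k' (cur ++ [s]) (digitsFrom 1) := by
              simp [searchGo, digitsFrom]
            rw [← hG]
            by_cases hRe : searchGo (k' + 1) (cur ++ [s]) = []
            · rw [if_pos hRe, hT, if_pos hRe]
              simp only [unwindSpec, hdrop, hdf1]
            · rw [if_neg hRe, hT, if_neg hRe, if_neg hRe]
          -- end descend
        · -- candidate fails: advance digit
          have hstep : loopB target (fuel + 1) cur (d :: rest) =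
              loopB target fuel cur ((d + 1) :: rest) := by
            simp only [loopB]
            rw [if_neg (by omega), htos, if_neg hgood]
          rw [hstep, ih k cur (d + 1) rest (by omega) hrest hlen harith
                (by
                  simp only [needed, hdf1, hlendf] at hfuel ⊢
                  have h2 := succ_le_digitsAfuel (k + 1) restd.length (by omega)
                  omega)]
          simp [tryDigits, isGoodSeq_eq_okSuffix, hgood, hdf1]
      interval_cases d
      · exact key '1' ['2', '3'] (by decide) (by decide) (by decide) (by decide)
      · exact key '2' ['3'] (by decide) (by decide) (by decide) (by decide)
      · exact key '3' [] (by decide) (by decide) (by decide) (by decide)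

-- ===== VERDICT (by name: the statement is the Claim_ definition above) =====
theorem search_spec : Claim_equal_search := by
  intro N seq _ hpre
  unfold Spec_search
  have hN : (N.toNat : Int) = N := Int.toNat_of_nonneg hpre
  unfold search search_alt
  match hk : N.toNat with
  | 0 =>
    have hN0 : N = 0 := by omega
    simp only [searchGo, hN0]
    rw [if_pos (by omega)]
    exact String.ofList_toList
  | k + 1 =>
    have hNk : N = (k : Int) + 1 := by omega
    rw [if_neg (by omega)]
    have := loopB_eq ((seq.toList.length : Int) + N) (2 * 3 ^ (k + 1)) k
        seq.toList 1 [] le_rfl (by simp) (by simp) (by omega)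
        (by
          have h1 : 1 ≤ (3 : Nat) ^ (k + 1) := Nat.one_le_pow _ _ (by omega)
          simp only [needed, restSum, show (digitsFrom 1).length = 3 from rfl,
            digitsAfuel_three]
          omega)
    rw [this]
    have hdf : digitsFrom 1 = ['1', '2', '3'] := by decide
    rw [hdf]
    simp only [searchGo, unwindSpec]
    by_cases h : tryDigits k seq.toList ['1', '2', '3'] = [] <;> simp [h]
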